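-- pv_equiv track=rewrite | github.com/ericmerle3789/Collatz-Junction-Theorem | scripts/research/r56_vcross.py | find_R1_primes
-- ===== SOURCE A (Python) =====
-- from math import comb, gcd, ceil, log2, sqrt, pi, cos, sin
--
-- def compute_S(k):
--     """Minimal S such that 2^S > 3^k. Exact via integer comparison."""
--     S = ceil(k * log2(3))
--     three_k = 3 ** k
--     while (1 << S) <= three_k:
--         S += 1
--     while S > 0 and (1 << (S - 1)) > three_k:
--         S -= 1
--     return S
--
-- def compute_max_B(k):
--     return compute_S(k) - k
--
-- def ord_mod(base, m):
--     if m <= 1 or gcd(base, m) != 1: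
--         return None
--     o = 1
--     v = base % m
--     while v != 1:
--         o += 1
--         v = (v * base) % m
--         if o > m:
--             return None
--     return o
--
-- def is_prime(n):
--     if n < 2:
--         return False
--     if n < 4:
--         return True
--     if n % 2 == 0 or n % 3 == 0:
--         return False
--     i = 5
--     while i * i <= n:
--         if n % i == 0 or n % (i + 2) == 0:
--             return False
--         i += 6
--     return True
--
-- def classify_regime(k, p):
--     max_B = compute_max_B(k)
--     ord2 = ord_mod(2, p)
--     if ord2 is None:
--         return 'R_gen', ord2
--     if ord2 >= max_B + 1:
--         return 'R1', ord2
--     else: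
--         return 'R_gen', ord2
--
-- def find_R1_primes(k, max_p=500, max_count=8):
--     """Find primes p in R1 for given k, up to max_p, at most max_count."""
--     max_B = compute_max_B(k)
--     primes = []
--     for p in range(5, max_p):
--         if not is_prime(p) or p == 2 or p == 3:
--             continue
--         regime, ord2 = classify_regime(k, p)
--         if regime == 'R1':
--             primes.append(p)
--             if len(primes) >= max_count:
--                 break
--     return primes
-- ===== SOURCE B (Python) =====
-- def _ord2(p):
--     """Multiplicative order of 2 mod an odd prime p: the smallest divisor d of
--     p - 1 with pow(2, d, p) == 1, found by scanning divisor pairs (i, n // i)."""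
--     n = p - 1
--     best = n          # n itself always qualifies for prime p (Fermat)
--     i = 1
--     while i * i <= n:
--         if n % i == 0:
--             for d in (i, n // i):
--                 if d < best and pow(2, d, p) == 1:
--                     best = d
--         i += 1
--     return best
--
--
-- def is_prime(n):
--     if n < 2:
--         return False
--     if n < 4:
--         return True
--     if n % 2 == 0 or n % 3 == 0:
--         return False
--     i = 5
--     while i * i <= n:
--         if n % i == 0 or n % (i + 2) == 0:
--             return False
--         i += 6
--     return True
--
--
-- def find_R1_primes(k, max_p=500, max_count=8):
--     """Find primes p in R1 for given k, up to max_p, at most max_count."""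
--     thr = (3 ** k).bit_length() - k + 1   # = max_B + 1, computed exactly, once
--     primes = []
--     for p in range(5, max_p):
--         if is_prime(p) and _ord2(p) >= thr:
--             primes.append(p)
--             if len(primes) >= max_count:
--                 break
--     return primes
-- ===== Notes on version B (the rewrite author's own statement) =====
-- stated objective: faster
-- what changed: B hoists the R1 threshold out of the per-prime loop and computes it exactly as (3**k).bit_length()-k+1 instead of A's float-seeded compute_S correction loops rerun for every prime, and replaces A's O(p) repeated-multiply multiplicative-order loop by an O(sqrt p) scan of the divisor pairs (i, (p-1)//i) of p-1 that returns the smallest divisor d with pow(2,d,p)==1.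
import Mathlib
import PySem

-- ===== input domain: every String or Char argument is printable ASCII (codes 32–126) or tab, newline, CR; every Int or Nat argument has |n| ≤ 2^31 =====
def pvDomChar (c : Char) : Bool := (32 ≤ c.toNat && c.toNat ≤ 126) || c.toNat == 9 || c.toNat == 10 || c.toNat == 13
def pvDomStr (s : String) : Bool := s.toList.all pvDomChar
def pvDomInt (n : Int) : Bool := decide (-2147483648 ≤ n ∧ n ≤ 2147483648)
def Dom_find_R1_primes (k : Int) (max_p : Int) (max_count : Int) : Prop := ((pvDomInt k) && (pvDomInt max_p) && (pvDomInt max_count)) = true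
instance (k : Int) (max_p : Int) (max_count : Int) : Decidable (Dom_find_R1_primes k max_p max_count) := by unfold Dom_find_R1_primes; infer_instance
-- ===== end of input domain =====

-- B replaces A's per-prime float-seeded threshold recomputation and O(p) repeated-multiply
-- order loop by a hoisted exact bit_length threshold and an O(sqrt p) divisor-pair scan for
-- the multiplicative order (objective: faster).

-- ===== PORT A =====
def pvLog2_3 : Int := 892254565955501  -- numerator of the exact value of the IEEE double log2(3) = pvLog2_3 / 2^49

def computeS_up (threeK : Int) : Int → Nat → Int
  | S, 0 => S
  | S, fuel+1 => if 2 ^ S.toNat ≤ threeK then computeS_up threeK (S+1) fuel else S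

def computeS_down (threeK : Int) : Int → Nat → Int
  | S, 0 => S
  | S, fuel+1 => if 0 < S ∧ threeK < 2 ^ (S-1).toNat then computeS_down threeK (S-1) fuel else S

-- `ceil(k*log2(3))` is ported as the exact ceiling of k times the rational value of the
-- double log2(3) (the one inexact spot: Python rounds the product to a double first); the
-- exact integer correction loops that follow erase any off-by-one of that seed, so
-- compute_S agrees with Python for every k ≥ 0 (Pre_). Fuel: 3^k < 2^(2k+3) for the up
-- loop; the down loop decreases S toward 0.
def compute_S (k : Int) : Int :=
  let S0 : Int := -(PySem.Int.floordiv (-(k * pvLog2_3)) (2 ^ 49))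
  let threeK : Int := 3 ^ k.toNat          -- 3**k; k ≥ 0 under Pre_
  let S1 := computeS_up threeK S0 (2 * k.toNat + 3)
  computeS_down threeK S1 (S1.toNat + 1)

def compute_max_B (k : Int) : Int := compute_S k - k

def ordLoop (base m : Int) : Int → Int → Nat → Option Int
  | _, _, 0 => none                         -- fuel only; loop exits by v = 1 or o > m first
  | o, v, fuel+1 =>
    if v = 1 then some o
    else
      let o' := o + 1
      let v' := PySem.Int.mod (v * base) m
      if m < o' then none else ordLoop base m o' v' fuel

def ord_mod (base m : Int) : Option Int :=
  if m ≤ 1 ∨ (Int.gcd base m : Int) ≠ 1 then none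
  else ordLoop base m 1 (PySem.Int.mod base m) (m.toNat + 2)

def isPrimeLoop (n : Int) : Int → Nat → Bool
  | _, 0 => false                           -- fuel only; i passes sqrt n first
  | i, fuel+1 =>
    if i * i ≤ n then
      if PySem.Int.mod n i = 0 ∨ PySem.Int.mod n (i+2) = 0 then false
      else isPrimeLoop n (i+6) fuel
    else true

def is_prime (n : Int) : Bool :=
  if n < 2 then false
  else if n < 4 then true
  else if PySem.Int.mod n 2 = 0 ∨ PySem.Int.mod n 3 = 0 then false
  else isPrimeLoop n 5 (n.toNat + 1)

def classify_regime (k p : Int) : String × Option Int :=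
  let max_B := compute_max_B k
  match ord_mod 2 p with
  | none => ("R_gen", none)
  | some o => if max_B + 1 ≤ o then ("R1", some o) else ("R_gen", some o)

def findLoopA (k max_p max_count : Int) : Int → List Int → Nat → List Int
  | _, primes, 0 => primes                  -- fuel only; p reaches max_p first
  | p, primes, fuel+1 =>
    if p < max_p then
      if ¬ (is_prime p = true) ∨ p = 2 ∨ p = 3 then findLoopA k max_p max_count (p+1) primes fuel
      else
        let regime_ord2 := classify_regime k p
        if regime_ord2.1 = "R1" then
          let primes' := primes ++ [p]
          if max_count ≤ (primes'.length : Int) then primes'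
          else findLoopA k max_p max_count (p+1) primes' fuel
        else findLoopA k max_p max_count (p+1) primes fuel
    else primes

def find_R1_primes (k : Int) (max_p : Int) (max_count : Int) : List Int :=
  let _max_B := compute_max_B k             -- computed and unused, as in the Python
  findLoopA k max_p max_count 5 [] ((max_p - 5).toNat + 1)

-- ===== PORT B =====
-- (Source B's is_prime is textually A's; the single definition above serves both ports)
-- tail-recursive, chunked port of the library call int.bit_length() (exact: proved = Nat.size below)
def pvChunkHi : Nat := 2 ^ 4096
def pvChunkLo : Nat := 2 ^ 64

def pyBitLenAux : Nat → Nat → Nat → Nat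
  | 0, _, acc => acc
  | fuel+1, n, acc =>
    if n = 0 then acc
    else if pvChunkHi ≤ n then pyBitLenAux fuel (n / pvChunkHi) (acc + 4096)
    else if pvChunkLo ≤ n then pyBitLenAux fuel (n / pvChunkLo) (acc + 64)
    else pyBitLenAux fuel (n / 2) (acc + 1)

def pyBitLen (n : Nat) : Nat := pyBitLenAux (n + 1) n 0

def ord2AltLoop (p n : Int) : Int → Int → Nat → Int
  | _, best, 0 => best                      -- fuel only; i passes sqrt n first
  | i, best, fuel+1 =>
    if i * i ≤ n then
      let best' :=
        if PySem.Int.mod n i = 0 then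
          -- for d in (i, n // i): if d < best and pow(2, d, p) == 1: best = d
          let b1 := if i < best ∧ PySem.Int.powMod 2 i.toNat p = 1 then i else best
          let d := PySem.Int.floordiv n i
          if d < b1 ∧ PySem.Int.powMod 2 d.toNat p = 1 then d else b1
        else best
      ord2AltLoop p n (i+1) best' fuel
    else best

def ord2Alt (p : Int) : Int :=
  let n := p - 1
  ord2AltLoop p n 1 n (n.toNat + 1)

def findLoopB (thr max_p max_count : Int) : Int → List Int → Nat → List Int
  | _, primes, 0 => primes                  -- fuel only; p reaches max_p first
  | p, primes, fuel+1 =>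
    if p < max_p then
      if is_prime p = true ∧ thr ≤ ord2Alt p then
        let primes' := primes ++ [p]
        if max_count ≤ (primes'.length : Int) then primes'
        else findLoopB thr max_p max_count (p+1) primes' fuel
      else findLoopB thr max_p max_count (p+1) primes fuel
    else primes

def find_R1_primes_alt (k : Int) (max_p : Int) (max_count : Int) : List Int :=
  let thr : Int := (pyBitLen (3 ^ k.toNat) : Int) - k + 1  -- (3**k).bit_length() - k + 1
  findLoopB thr max_p max_count 5 [] ((max_p - 5).toNat + 1)

-- ===== PRECONDITION & SPEC =====
-- Pre_ excludes k < 0, on which A raises ValueError (1 << S with negative S inside compute_S).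
def Pre_find_R1_primes (k : Int) (max_p : Int) (max_count : Int) : Prop := 0 ≤ k
instance (k : Int) (max_p : Int) (max_count : Int) : Decidable (Pre_find_R1_primes k max_p max_count) := by unfold Pre_find_R1_primes; infer_instance
def pvWitness_find_R1_primes : Int × Int × Int := (2, 60, 8)

def Spec_find_R1_primes (k : Int) (max_p : Int) (max_count : Int) (out : List Int) : Prop := out = find_R1_primes_alt k max_p max_count
instance (k : Int) (max_p : Int) (max_count : Int) (out : List Int) : Decidable (Spec_find_R1_primes k max_p max_count out) := by unfold Spec_find_R1_primes; infer_instance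

-- ===== CLAIM (what is proved, stated in full; the proofs are below) =====
def Claim_equal_find_R1_primes : Prop := ∀ (k : Int) (max_p : Int) (max_count : Int), Dom_find_R1_primes k max_p max_count → Pre_find_R1_primes k max_p max_count → Spec_find_R1_primes k max_p max_count (find_R1_primes k max_p max_count)

-- ===== LEMMAS AND PROOFS =====

lemma three_pow_lt (j : Nat) : (3:Nat) ^ j < 2 ^ (2 * j + 3) := by
  induction j with
  | zero => decide
  | succ j ih =>
    have : (3:Nat) ^ (j+1) = 3 * 3 ^ j := by ring
    rw [this]
    have h2 : 2 ^ (2 * (j+1) + 3) = 4 * 2 ^ (2*j+3) := by ring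
    rw [h2]
    have hp : 0 < 2 ^ (2*j+3) := Nat.two_pow_pos _
    nlinarith [ih]

lemma up_spec (n : Int) (fuel : Nat) : ∀ S : Int, 0 ≤ S → n < 2 ^ (S.toNat + fuel) →
    0 ≤ computeS_up n S fuel ∧ S ≤ computeS_up n S fuel ∧
    (n : Int) < 2 ^ (computeS_up n S fuel).toNat ∧
    (computeS_up n S fuel = S ∨ 2 ^ ((computeS_up n S fuel).toNat - 1) ≤ n) := by
  induction fuel with
  | zero =>
    intro S hS hlt
    simp only [computeS_up]
    exact ⟨hS, le_rfl, by simpa using hlt, Or.inl (by simp)⟩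
  | succ fuel ih =>
    intro S hS hlt
    simp only [computeS_up]
    by_cases hc : (2:Int) ^ S.toNat ≤ n
    · simp only [if_pos hc]
      have hS1 : (0:Int) ≤ S + 1 := by omega
      have htn : (S+1).toNat = S.toNat + 1 := by omega
      have hlt' : n < 2 ^ ((S+1).toNat + fuel) := by
        rw [htn]; rw [show S.toNat + 1 + fuel = S.toNat + (fuel+1) by omega]; exact hlt
      obtain ⟨h0, hle, hfin, hd⟩ := ih (S+1) hS1 hlt'
      refine ⟨h0, by omega, hfin, ?_⟩
      rcases hd with h | h
      · right; rw [h, htn]; simpa using hc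
      · right; exact h
    · simp only [if_neg hc]
      exact ⟨hS, le_rfl, by omega, Or.inl (by simp)⟩

lemma down_spec (n : Int) (fuel : Nat) : ∀ S : Int, 0 ≤ S → n < 2 ^ S.toNat → S.toNat ≤ fuel →
    0 ≤ computeS_down n S fuel ∧ n < 2 ^ (computeS_down n S fuel).toNat ∧
    (computeS_down n S fuel = 0 ∨ 2 ^ ((computeS_down n S fuel).toNat - 1) ≤ n) := by
  induction fuel with
  | zero =>
    intro S hS hlt hf
    have : S = 0 := by omega
    subst this
    simp only [computeS_down]
    exact ⟨le_rfl, hlt, Or.inl (by simp)⟩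
  | succ fuel ih =>
    intro S hS hlt hf
    simp only [computeS_down]
    by_cases hc : 0 < S ∧ n < 2 ^ (S-1).toNat
    · simp only [if_pos hc]
      exact ih (S-1) (by omega) hc.2 (by omega)
    · simp only [if_neg hc]
      refine ⟨hS, hlt, ?_⟩
      push Not at hc
      by_cases h0 : S = 0
      · exact Or.inl h0
      · right
        have h1 : 0 < S := by omega
        have := hc h1
        have : (2:Int) ^ (S-1).toNat ≤ n := by omega
        rwa [show (S-1).toNat = S.toNat - 1 by omega] at this

lemma size_succ_div (n : Nat) (h : n ≠ 0) : Nat.size n = Nat.size (n / 2) + 1 := by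
  set s : Nat := Nat.size (n / 2) with hs
  have h1 : n / 2 < 2 ^ s := Nat.lt_size_self _
  have h2 : 2 ^ s ≤ n := by
    rcases Nat.eq_zero_or_pos s with h0 | hp
    · rw [h0]; omega
    · have : s - 1 < Nat.size (n / 2) := by omega
      have := Nat.lt_size.mp this
      have hpow : (2:Nat) ^ s = 2 * 2 ^ (s - 1) := by
        rw [← pow_succ']
        congr 1
        omega
      omega
  apply le_antisymm
  · rw [Nat.size_le]
    have hpow : (2:Nat) ^ (s+1) = 2 * 2 ^ s := by rw [pow_succ]; ring
    omega
  · rw [Nat.succ_le_iff, Nat.lt_size]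
    exact h2

lemma size_div_pow (n : Nat) : ∀ j : Nat, 2 ^ j ≤ n → Nat.size n = Nat.size (n / 2 ^ j) + j := by
  intro j
  induction j with
  | zero => simp
  | succ j ih =>
    intro h
    have h2 : (2:Nat) ^ j ≤ n := le_trans (Nat.pow_le_pow_right (by norm_num) (by omega)) h
    rw [ih h2]
    have hne : n / 2 ^ j ≠ 0 := by
      have hp : 0 < (2:Nat) ^ j := Nat.two_pow_pos j
      have := (Nat.one_le_div_iff hp (a := n)).mpr h2
      omega
    rw [size_succ_div _ hne, Nat.div_div_eq_div_mul, ← pow_succ]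
    omega

lemma pyBitLenAux_eq : ∀ (fuel n acc : Nat), n < 2 ^ fuel →
    pyBitLenAux fuel n acc = Nat.size n + acc := by
  intro fuel
  induction fuel with
  | zero =>
    intro n acc h
    have : n = 0 := by simpa using h
    subst this
    simp [pyBitLenAux, Nat.size_zero]
  | succ fuel ih =>
    intro n acc h
    have hhalf : n / 2 < 2 ^ fuel := by rw [pow_succ] at h; omega
    rw [pyBitLenAux]
    by_cases h0 : n = 0
    · subst h0; simp [Nat.size_zero]
    · rw [if_neg h0]
      by_cases hHi : pvChunkHi ≤ n
      · rw [if_pos hHi]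
        have hle : n / pvChunkHi ≤ n / 2 := by
          apply Nat.div_le_div_left _ (by norm_num)
          calc (2:Nat) = 2 ^ 1 := (pow_one 2).symm
            _ ≤ 2 ^ 4096 := Nat.pow_le_pow_right (by norm_num) (by norm_num)
        rw [ih (n / pvChunkHi) (acc + 4096) (by omega)]
        have := size_div_pow n 4096 (by simpa [pvChunkHi] using hHi)
        simp only [pvChunkHi] at *
        omega
      · rw [if_neg hHi]
        by_cases hLo : pvChunkLo ≤ n
        · rw [if_pos hLo]
          have hle : n / pvChunkLo ≤ n / 2 := by
            apply Nat.div_le_div_left _ (by norm_num)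
            calc (2:Nat) = 2 ^ 1 := (pow_one 2).symm
              _ ≤ 2 ^ 64 := Nat.pow_le_pow_right (by norm_num) (by norm_num)
          rw [ih (n / pvChunkLo) (acc + 64) (by omega)]
          have := size_div_pow n 64 (by simpa [pvChunkLo] using hLo)
          simp only [pvChunkLo] at *
          omega
        · rw [if_neg hLo]
          rw [ih (n / 2) (acc + 1) hhalf]
          rw [size_succ_div n h0]
          omega

lemma pyBitLen_eq_size (n : Nat) : pyBitLen n = Nat.size n := by
  unfold pyBitLen
  rw [pyBitLenAux_eq (n+1) n 0 (Nat.lt_two_pow_self.trans_le (Nat.pow_le_pow_right (by norm_num) (by omega)))]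
  omega

lemma compute_S_eq (k : Int) (hk : 0 ≤ k) :
    compute_S k = (pyBitLen ((3:Nat) ^ k.toNat) : Int) := by
  unfold compute_S
  rw [pyBitLen_eq_size]
  set n : Int := (3:Int) ^ k.toNat with hn
  set L : Nat := Nat.size ((3:Nat) ^ k.toNat) with hL
  have hnpos : 0 < n := by positivity
  have hcast : (((3:Nat) ^ k.toNat : Nat) : Int) = n := by push_cast; ring
  have hLup : n < (2:Int) ^ L := by
    have := Nat.lt_size_self ((3:Nat) ^ k.toNat)
    calc n = (((3:Nat) ^ k.toNat : Nat) : Int) := hcast.symm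
      _ < ((2 ^ L : Nat) : Int) := by exact_mod_cast this
      _ = (2:Int) ^ L := by push_cast; ring
  have hL1 : 1 ≤ L := by
    rw [hL, Nat.succ_le_iff, Nat.size_pos]
    positivity
  have hLlo : (2:Int) ^ (L - 1) ≤ n := by
    have := Nat.lt_size.mp (show L - 1 < Nat.size ((3:Nat) ^ k.toNat) by omega)
    calc (2:Int) ^ (L-1) = ((2 ^ (L-1) : Nat) : Int) := by push_cast; ring
      _ ≤ (((3:Nat) ^ k.toNat : Nat) : Int) := by exact_mod_cast this
      _ = n := hcast
  have hmin : ∀ T : Nat, n < (2:Int) ^ T → L ≤ T := by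
    intro T hT
    by_contra h
    have hTL : T ≤ L - 1 := by omega
    have : (2:Int) ^ T ≤ 2 ^ (L-1) := by
      apply pow_le_pow_right₀ (by norm_num) hTL
    omega
  -- the ceiling seed is nonnegative
  set S0 : Int := -(PySem.Int.floordiv (-(k * pvLog2_3)) (2 ^ 49)) with hS0d
  have hbr := (PySem.Int.neg_floordiv_neg_eq_iff_of_pos
      (a := k * pvLog2_3) (b := 2 ^ 49) (q := S0) (by norm_num)).mp rfl
  have hkM : (0:Int) ≤ k * pvLog2_3 := by
    apply mul_nonneg hk; norm_num [pvLog2_3]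
  have hS0 : 0 ≤ S0 := by nlinarith [hbr.2]
  -- fuel for the up loop
  have hfuel : n < (2:Int) ^ (S0.toNat + (2 * k.toNat + 3)) := by
    have h1 : (3:Nat) ^ k.toNat < 2 ^ (2 * k.toNat + 3) := three_pow_lt k.toNat
    have h2 : (2:Nat) ^ (2 * k.toNat + 3) ≤ 2 ^ (S0.toNat + (2 * k.toNat + 3)) :=
      Nat.pow_le_pow_right (by norm_num) (by omega)
    calc n = ((3 ^ k.toNat : Nat) : Int) := by push_cast; ring
      _ < ((2 ^ (S0.toNat + (2 * k.toNat + 3)) : Nat) : Int) := by exact_mod_cast lt_of_lt_of_le h1 h2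
      _ = (2:Int) ^ (S0.toNat + (2 * k.toNat + 3)) := by push_cast; ring
  obtain ⟨hu0, _hule, hufin, _hud⟩ := up_spec n (2 * k.toNat + 3) S0 hS0 hfuel
  set S1 : Int := computeS_up n S0 (2 * k.toNat + 3) with hS1d
  obtain ⟨hd0, hdlt, hdd⟩ := down_spec n (S1.toNat + 1) S1 hu0 hufin (by omega)
  set D : Int := computeS_down n S1 (S1.toNat + 1) with hDd2
  have hLleD : L ≤ D.toNat := hmin D.toNat hdlt
  have hDne : D ≠ 0 := by
    intro h
    rw [h] at hLleD
    simp at hLleD; omega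
  rcases hdd with h | h
  · exact absurd h hDne
  · have hDleL : D.toNat ≤ L := by
      by_contra hcon
      have : L ≤ D.toNat - 1 := by omega
      have : (2:Int) ^ L ≤ 2 ^ (D.toNat - 1) := pow_le_pow_right₀ (by norm_num) this
      omega
    omega

lemma isPrimeLoop_sound (p : Int) (fuel : Nat) : ∀ i : Int, 0 < i →
    isPrimeLoop p i fuel = true →
    ∀ (r : Int) (t : Nat), (r = i + 6 * t ∨ r = i + 6 * t + 2) → r * r ≤ p → ¬ r ∣ p := by
  induction fuel with
  | zero => intro i _ h; simp [isPrimeLoop] at h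
  | succ fuel ih =>
    intro i hi h r t ht hrr hdvd
    rw [isPrimeLoop] at h
    by_cases hc : i * i ≤ p
    · rw [if_pos hc] at h
      by_cases hm : PySem.Int.mod p i = 0 ∨ PySem.Int.mod p (i+2) = 0
      · rw [if_pos hm] at h; exact absurd h (by simp)
      · rw [if_neg hm] at h
        match t with
        | 0 =>
          apply hm
          rcases ht with h' | h'
          · left; rw [PySem.Int.mod_eq_zero_iff_dvd]; simpa [h'] using hdvd
          · right; rw [PySem.Int.mod_eq_zero_iff_dvd]
            have : r = i + 2 := by omega
            simpa [this] using hdvd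
        | t+1 =>
          exact ih (i+6) (by omega) h r t (by rcases ht with h' | h' <;> [left; right] <;> push_cast [h'] <;> ring) hrr hdvd
    · -- i*i > p: impossible since r ≥ i > 0 and r*r ≤ p
      have hri : i ≤ r := by rcases ht with h' | h' <;> omega
      have : i * i ≤ r * r := by nlinarith
      omega

lemma is_prime_sound (p : Int) (h5 : 5 ≤ p) (h : is_prime p = true) : Nat.Prime p.toNat := by
  rw [is_prime, if_neg (by omega), if_neg (by omega)] at h
  by_cases hm : PySem.Int.mod p 2 = 0 ∨ PySem.Int.mod p 3 = 0
  · rw [if_pos hm] at h; exact absurd h (by simp)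
  rw [if_neg hm] at h
  push Not at hm
  have h2 : ¬ (2:Int) ∣ p := fun hd => hm.1 (by rwa [PySem.Int.mod_eq_zero_iff_dvd])
  have h3 : ¬ (3:Int) ∣ p := fun hd => hm.2 (by rwa [PySem.Int.mod_eq_zero_iff_dvd])
  set q : Nat := p.toNat with hq
  have hpq : p = (q : Int) := by omega
  by_contra hnp
  have hq2 : 2 ≤ q := by omega
  set r : Nat := q.minFac with hr
  have hrp : r.Prime := Nat.minFac_prime (by omega)
  have hrd : r ∣ q := Nat.minFac_dvd q
  have hrsq : r * r ≤ q := by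
    have := Nat.minFac_sq_le_self (by omega) hnp
    nlinarith [this]
  have hrdI : (r : Int) ∣ p := by rw [hpq]; exact_mod_cast hrd
  have hr2 : r ≠ 2 := by
    intro he; apply h2; rw [he] at hrdI; exact_mod_cast hrdI
  have hr3 : r ≠ 3 := by
    intro he; apply h3; rw [he] at hrdI; exact_mod_cast hrdI
  have hr2' : ¬ 2 ∣ r := fun hd => hr2 ((Nat.prime_dvd_prime_iff_eq Nat.prime_two hrp).mp hd).symm
  have hr3' : ¬ 3 ∣ r := fun hd => hr3 ((Nat.prime_dvd_prime_iff_eq Nat.prime_three hrp).mp hd).symm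
  have hrge : 2 ≤ r := hrp.two_le
  have hmod : r % 6 = 1 ∨ r % 6 = 5 := by omega
  have hrr : (r:Int) * r ≤ p := by rw [hpq]; exact_mod_cast hrsq
  have h5r : 5 ≤ r := by
    have : r ≠ 4 := by intro he; exact hr2' (by omega)
    omega
  rcases hmod with h1 | h1
  · -- r ≡ 1 [6], r ≥ 7: r = 5 + 6t + 2
    have h7 : 7 ≤ r := by omega
    refine isPrimeLoop_sound p (p.toNat+1) 5 (by norm_num) h (r:Int) ((r-7)/6) (Or.inr ?_) hrr hrdI
    have : 6 * ((r-7)/6) = r - 7 := by omega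
    push_cast [this]; omega
  · refine isPrimeLoop_sound p (p.toNat+1) 5 (by norm_num) h (r:Int) ((r-5)/6) (Or.inl ?_) hrr hrdI
    have : 6 * ((r-5)/6) = r - 5 := by omega
    push_cast [this]; omega

lemma mod_pow_bridge (p : Int) (h5 : 5 ≤ p) (t : Nat) :
    PySem.Int.mod ((2:Int) ^ t) p = 1 ↔ orderOf (2 : ZMod p.toNat) ∣ t := by
  set q : Nat := p.toNat with hq
  have hq5 : 5 ≤ q := by omega
  have hpq : p = (q : Int) := by omega
  rw [PySem.Int.mod_eq_emod_of_pos (by omega)]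
  have h1 : ((2:Int) ^ t) % p = (((2 ^ t % q : Nat)) : Int) := by
    rw [hpq]; push_cast; ring_nf
  rw [h1]
  constructor
  · intro h
    have h2 : (2:ℕ) ^ t % q = 1 := by exact_mod_cast h
    have h3 : (2:ℕ) ^ t ≡ 1 [MOD q] := by
      unfold Nat.ModEq; rw [h2, Nat.mod_eq_of_lt (by omega)]
    have h4 : ((2 ^ t : ℕ) : ZMod q) = ((1 : ℕ) : ZMod q) := (ZMod.natCast_eq_natCast_iff _ _ _).mpr h3
    rw [orderOf_dvd_iff_pow_eq_one]
    push_cast at h4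
    simpa using h4
  · intro h
    rw [orderOf_dvd_iff_pow_eq_one] at h
    have h4 : ((2 ^ t : ℕ) : ZMod q) = ((1 : ℕ) : ZMod q) := by push_cast; simpa using h
    have h3 := (ZMod.natCast_eq_natCast_iff _ _ _).mp h4
    unfold Nat.ModEq at h3
    rw [Nat.one_mod_eq_one.mpr (by omega)] at h3
    exact_mod_cast h3

lemma ordLoopA_eq (p : Int) (h5 : 5 ≤ p) (N : Nat) (_hNpos : 0 < N)
    (hNle : (N:Int) ≤ p - 1)
    (hbr : ∀ t : Nat, PySem.Int.mod ((2:Int) ^ t) p = 1 ↔ N ∣ t) :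
    ∀ (fuel : Nat) (o : Int), 1 ≤ o → o ≤ (N:Int) → (N:Int) - o + 1 ≤ (fuel:Int) →
    ordLoop 2 p o (PySem.Int.mod ((2:Int) ^ o.toNat) p) fuel = some (N:Int) := by
  intro fuel
  induction fuel with
  | zero => intro o h1 hN hf; exfalso; omega
  | succ fuel ih =>
    intro o h1 hN hf
    rw [ordLoop]
    by_cases hv : PySem.Int.mod ((2:Int) ^ o.toNat) p = 1
    · rw [if_pos hv]
      have hd : N ∣ o.toNat := (hbr o.toNat).mp hv
      have : N ≤ o.toNat := Nat.le_of_dvd (by omega) hd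
      have : o = (N:Int) := by omega
      rw [this]
    · rw [if_neg hv]
      have hlt : o < (N:Int) := by
        rcases lt_or_eq_of_le hN with h | h
        · exact h
        · exfalso; apply hv; rw [hbr]; rw [show o.toNat = N by omega]
      rw [if_neg (by omega)]
      have hv' : PySem.Int.mod (PySem.Int.mod ((2:Int) ^ o.toNat) p * 2) p
          = PySem.Int.mod ((2:Int) ^ (o+1).toNat) p := by
        rw [PySem.Int.mod_eq_emod_of_pos (by omega), PySem.Int.mod_eq_emod_of_pos (by omega),
            PySem.Int.mod_eq_emod_of_pos (by omega)]
        rw [show (o+1).toNat = o.toNat + 1 by omega, pow_succ]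
        conv_rhs => rw [Int.mul_emod]
        rw [Int.mul_emod, Int.emod_emod_of_dvd _ (dvd_refl p)]
      rw [hv']
      exact ih (o+1) (by omega) (by omega) (by omega)

lemma ord2AltLoop_min (p n : Int) (hn : 4 ≤ n) (N : Nat)
    (hbr : ∀ d : Int, 0 < d → (PySem.Int.powMod 2 d.toNat p = 1 ↔ (N:Int) ∣ d)) :
    ∀ (fuel : Nat) (i best : Int), 1 ≤ i →
    (0 < best ∧ best ∣ n ∧ (N:Int) ∣ best) →
    (∀ d : Int, (0 < d ∧ d ∣ n ∧ (N:Int) ∣ d) → d < best → i ≤ d ∧ i * d ≤ n) →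
    (n < i + (fuel:Int)) →
    (0 < ord2AltLoop p n i best fuel ∧ ord2AltLoop p n i best fuel ∣ n ∧
     (N:Int) ∣ ord2AltLoop p n i best fuel) ∧
    (∀ d : Int, (0 < d ∧ d ∣ n ∧ (N:Int) ∣ d) → ord2AltLoop p n i best fuel ≤ d) := by
  intro fuel
  induction fuel with
  | zero =>
    intro i best hi hQ hinv hfuel
    rw [ord2AltLoop]
    refine ⟨hQ, ?_⟩
    intro d hQd
    by_contra hlt
    obtain ⟨hid, hmul⟩ := hinv d hQd (by omega)
    have : d ≤ n := Int.le_of_dvd (by omega) hQd.2.1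
    omega
  | succ fuel ih =>
    intro i best hi hQ hinv hfuel
    rw [ord2AltLoop]
    by_cases hii : i * i ≤ n
    · rw [if_pos hii]
      by_cases hm : PySem.Int.mod n i = 0
      · rw [if_pos hm]
        have hidvd : i ∣ n := by rwa [PySem.Int.mod_eq_zero_iff_dvd] at hm
        have hfd : PySem.Int.floordiv n i = n / i := PySem.Int.floordiv_eq_ediv_of_pos (by omega)
        have hic : i * (n / i) = n := Int.mul_ediv_cancel' hidvd
        set c : Int := n / i with hc
        have hcpos : 0 < c := by nlinarith
        have hcdvd : c ∣ n := ⟨i, by rw [← hic]; ring⟩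
        set b1 : Int := if i < best ∧ PySem.Int.powMod 2 i.toNat p = 1 then i else best with hb1
        have hQb1 : 0 < b1 ∧ b1 ∣ n ∧ (N:Int) ∣ b1 := by
          rw [hb1]; split_ifs with h
          · exact ⟨by omega, hidvd, (hbr i (by omega)).mp h.2⟩
          · exact hQ
        have hb1le : b1 ≤ best := by
          rw [hb1]; split_ifs with h
          · omega
          · omega
        rw [hfd]
        set b2 : Int := if c < b1 ∧ PySem.Int.powMod 2 c.toNat p = 1 then c else b1 with hb2
        have hQb2 : 0 < b2 ∧ b2 ∣ n ∧ (N:Int) ∣ b2 := by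
          rw [hb2]; split_ifs with h
          · exact ⟨hcpos, hcdvd, (hbr c hcpos).mp h.2⟩
          · exact hQb1
        have hb2le : b2 ≤ b1 := by
          rw [hb2]; split_ifs with h
          · omega
          · omega
        refine ih (i+1) b2 (by omega) hQb2 ?_ (by omega)
        intro d hQd hdb2
        obtain ⟨hid, hmul⟩ := hinv d hQd (by omega)
        have hdn : d ≠ i := by
          intro he
          have hpow : PySem.Int.powMod 2 i.toNat p = 1 := by
            rw [← he]; exact (hbr d (by omega)).mpr hQd.2.2
          by_cases hib : i < best
          · have : b1 = i := by rw [hb1, if_pos ⟨hib, hpow⟩]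
            omega
          · omega
        have hdc : d ≠ c := by
          intro he
          have hpow : PySem.Int.powMod 2 c.toNat p = 1 := by
            rw [← he]; exact (hbr d (by omega)).mpr hQd.2.2
          by_cases hcb : c < b1
          · have : b2 = c := by rw [hb2, if_pos ⟨hcb, hpow⟩]
            omega
          · omega
        obtain ⟨c', hc'⟩ := hQd.2.1
        have hc'pos : 0 < c' := by nlinarith
        have hic' : i ≤ c' := by nlinarith
        have hc'ne : c' ≠ i := by
          intro he
          apply hdc
          have : i * c = i * d := by rw [hic, hc', he]; ring
          have : c = d := by
            have hi0 : i ≠ 0 := by omega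
            exact mul_left_cancel₀ hi0 this
          omega
        constructor
        · omega
        · calc (i+1) * d ≤ c' * d := by
                apply mul_le_mul_of_nonneg_right (by omega) (by omega)
            _ = n := by rw [hc']; ring
      · rw [if_neg hm]
        have hindvd : ¬ i ∣ n := by rwa [PySem.Int.mod_eq_zero_iff_dvd] at hm
        refine ih (i+1) best (by omega) hQ ?_ (by omega)
        intro d hQd hdb
        obtain ⟨hid, hmul⟩ := hinv d hQd hdb
        have hdn : d ≠ i := by
          intro he; exact hindvd (he ▸ hQd.2.1)
        obtain ⟨c', hc'⟩ := hQd.2.1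
        have hc'pos : 0 < c' := by nlinarith
        have hic' : i ≤ c' := by nlinarith
        have hc'ne : c' ≠ i := by
          intro he
          exact hindvd ⟨d, by rw [hc', he]; ring⟩
        constructor
        · omega
        · calc (i+1) * d ≤ c' * d := by
                apply mul_le_mul_of_nonneg_right (by omega) (by omega)
            _ = n := by rw [hc']; ring
    · rw [if_neg hii]
      refine ⟨hQ, ?_⟩
      intro d hQd
      by_contra hlt
      obtain ⟨hid, hmul⟩ := hinv d hQd (by omega)
      nlinarith

lemma ord_agree (p : Int) (h5 : 5 ≤ p) (hpr : Nat.Prime p.toNat) :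
    ord_mod 2 p = some (ord2Alt p) := by
  haveI : Fact (Nat.Prime p.toNat) := ⟨hpr⟩
  set q : Nat := p.toNat with hq
  have hq5 : 5 ≤ q := by omega
  have h2ne : (2 : ZMod q) ≠ 0 := by
    have : ((2:ℕ) : ZMod q) ≠ 0 := by
      intro hz
      have := (ZMod.natCast_eq_zero_iff 2 q).mp hz
      have := Nat.le_of_dvd (by omega) this
      omega
    simpa using this
  have fermat : (2 : ZMod q) ^ (q - 1) = 1 := ZMod.pow_card_sub_one_eq_one h2ne
  set N : Nat := orderOf (2 : ZMod q) with hN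
  have hNpos : 0 < N :=
    (isOfFinOrder_iff_pow_eq_one.mpr ⟨q - 1, by omega, fermat⟩).orderOf_pos
  have hNdvd : N ∣ q - 1 := orderOf_dvd_of_pow_eq_one fermat
  have hNle : (N:Int) ≤ p - 1 := by
    have := Nat.le_of_dvd (by omega) hNdvd
    omega
  have hbr : ∀ t : Nat, PySem.Int.mod ((2:Int) ^ t) p = 1 ↔ N ∣ t :=
    fun t => mod_pow_bridge p h5 t
  have hbrI : ∀ d : Int, 0 < d → (PySem.Int.powMod 2 d.toNat p = 1 ↔ (N:Int) ∣ d) := by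
    intro d hd
    simp only [PySem.Int.powMod]
    rw [hbr d.toNat]
    constructor
    · intro h
      have : (N:Int) ∣ (d.toNat : Int) := Int.natCast_dvd_natCast.mpr h
      rwa [Int.toNat_of_nonneg (by omega)] at this
    · intro h
      have : (N:Int) ∣ (d.toNat : Int) := by rwa [Int.toNat_of_nonneg (by omega)]
      exact_mod_cast this
  -- the B side computes N
  have hBn : ord2Alt p = (N:Int) := by
    rw [show ord2Alt p = ord2AltLoop p (p-1) 1 (p-1) ((p-1).toNat + 1) from rfl]
    have hn4 : 4 ≤ p - 1 := by omega
    have hNn : (N:Int) ∣ (p - 1) := by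
      have : ((q - 1 : ℕ) : Int) = p - 1 := by omega
      rw [← this]
      exact_mod_cast hNdvd
    obtain ⟨hQ, hmin⟩ := ord2AltLoop_min p (p-1) hn4 N hbrI ((p-1).toNat + 1) 1 (p-1)
      (by omega) ⟨by omega, dvd_refl _, hNn⟩
      (by
        intro d hQd _
        refine ⟨?_, ?_⟩
        · omega
        · have := Int.le_of_dvd (by omega) hQd.2.1
          omega)
      (by omega)
    have h1 : ord2AltLoop p (p-1) 1 (p-1) ((p-1).toNat + 1) ≤ (N:Int) :=
      hmin (N:Int) ⟨by exact_mod_cast hNpos, hNn, dvd_refl _⟩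
    have h2 : (N:Int) ≤ ord2AltLoop p (p-1) 1 (p-1) ((p-1).toNat + 1) :=
      Int.le_of_dvd hQ.1 hQ.2.2
    omega
  -- the A side computes N
  rw [hBn]
  unfold ord_mod
  have hgcd : (Int.gcd 2 p : Int) = 1 := by
    have hco : Nat.Coprime 2 q := (Nat.coprime_primes Nat.prime_two hpr).mpr (by omega)
    have : Int.gcd 2 p = Nat.gcd 2 q := by
      have h' : p.natAbs = q := by omega
      simp [Int.gcd, h']
    rw [this, hco]
    norm_num
  rw [if_neg (by push Not; exact ⟨by omega, hgcd⟩)]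
  have hinit : PySem.Int.mod 2 p = PySem.Int.mod ((2:Int) ^ (1:Int).toNat) p := by norm_num
  rw [hinit]
  exact ordLoopA_eq p h5 N hNpos hNle hbr (p.toNat + 2) 1 le_rfl (by exact_mod_cast hNpos) (by omega)

lemma loops_agree (k max_p max_count thr : Int)
    (hthr : thr = compute_max_B k + 1) (fuel : Nat) :
    ∀ (p : Int) (primes : List Int), 5 ≤ p →
    findLoopA k max_p max_count p primes fuel = findLoopB thr max_p max_count p primes fuel := by
  subst hthr
  induction fuel with
  | zero => intro p primes _; rfl
  | succ fuel ih =>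
    intro p primes hp
    rw [findLoopA, findLoopB]
    by_cases hlt : p < max_p
    · rw [if_pos hlt, if_pos hlt]
      by_cases hpr : is_prime p = true
      · have hprime := is_prime_sound p hp hpr
        have hcr : classify_regime k p =
            (if compute_max_B k + 1 ≤ ord2Alt p then ("R1", some (ord2Alt p))
             else ("R_gen", some (ord2Alt p))) := by
          unfold classify_regime
          rw [ord_agree p hp hprime]
        rw [if_neg (by push Not; exact ⟨hpr, by omega, by omega⟩)]
        rw [hcr]
        by_cases hord : compute_max_B k + 1 ≤ ord2Alt p
        · simp only [hord, hpr, if_pos, and_self]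
          by_cases hcnt : max_count ≤ ((primes ++ [p]).length : Int)
          · rw [if_pos hcnt, if_pos hcnt]
          · rw [if_neg hcnt, if_neg hcnt]
            exact ih (p+1) (primes ++ [p]) (by omega)
        · simp only [hpr, true_and, if_neg hord]
          exact ih (p+1) primes (by omega)
      · rw [if_pos (Or.inl hpr), if_neg (by push Not; intro h; exact absurd h hpr)]
        exact ih (p+1) primes (by omega)
    · rw [if_neg hlt, if_neg hlt]

-- ===== VERDICT (by name: the statement is the Claim_ definition above) =====
theorem find_R1_primes_spec : Claim_equal_find_R1_primes := by
  intro k max_p max_count _hdom hk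
  unfold Spec_find_R1_primes find_R1_primes find_R1_primes_alt
  exact loops_agree k max_p max_count _ (by
    unfold compute_max_B
    rw [compute_S_eq k hk]) ((max_p - 5).toNat + 1) 5 [] le_rfl
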